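-- pv_equiv track=rewrite | github.com/infocyde/simple_agentic_software_team | core/orchestrator.py | _determine_agent_for_task
-- ===== SOURCE A (Python) =====
-- def _determine_agent_for_task(task_text: str) -> str:
--     """Determine which agent should handle a task based on keywords."""
--     task_lower = task_text.lower()
--
--     # QA/Testing related
--     if any(kw in task_lower for kw in ['test', 'qa', 'verify', 'bug', 'fix bug', 'regression', 'validation']):
--         return "qa_tester"
--
--     # UI/UX related
--     if any(kw in task_lower for kw in ['ui', 'ux', 'design', 'css', 'style', 'layout', 'interface', 'frontend', 'html', 'template']):
--         return "ui_ux_engineer"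
--
--     # Database related
--     if any(kw in task_lower for kw in ['database', 'db', 'schema', 'sql', 'migration', 'model', 'table', 'query']):
--         return "database_admin"
--
--     # Security related
--     if any(kw in task_lower for kw in ['security', 'auth', 'authentication', 'authorization', 'encrypt', 'password', 'token']):
--         return "security_reviewer"
--
--     # Default to software engineer
--     return "software_engineer"
-- ===== SOURCE B (Python) =====
-- # Position-major single scan: walk the lowercased text once; at each start
-- # position test every flattened (keyword, priority) entry with startswith,
-- # keeping the minimum priority seen; index the agent array at the end.
-- _AGENTS = ["qa_tester", "ui_ux_engineer", "database_admin",
--            "security_reviewer", "software_engineer"]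
--
-- _KEYWORDS = [
--     ("test", 0), ("qa", 0), ("verify", 0), ("bug", 0), ("fix bug", 0),
--     ("regression", 0), ("validation", 0),
--     ("ui", 1), ("ux", 1), ("design", 1), ("css", 1), ("style", 1),
--     ("layout", 1), ("interface", 1), ("frontend", 1), ("html", 1),
--     ("template", 1),
--     ("database", 2), ("db", 2), ("schema", 2), ("sql", 2), ("migration", 2),
--     ("model", 2), ("table", 2), ("query", 2),
--     ("security", 3), ("auth", 3), ("authentication", 3),
--     ("authorization", 3), ("encrypt", 3), ("password", 3), ("token", 3),
-- ]
--
-- def _determine_agent_for_task(task_text: str) -> str: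
--     t = task_text.lower()
--     best = 4
--     for i in range(len(t) + 1):
--         for kw, pri in _KEYWORDS:
--             if pri < best and t.startswith(kw, i):
--                 best = pri
--     return _AGENTS[best]
-- ===== Notes on version B (the rewrite author's own statement) =====
-- stated objective: alternative
-- what changed: Replaced keyword-major unrolled if/any substring branches by a position-major single scan: the lowercased text is walked once and at each start position every flattened (keyword, priority) entry is tested with startswith while a minimum-priority accumulator is kept, the agent being picked from an array at the end; same asymptotic cost but it trades C-level substring search for explicit position iteration (slower constants in CPython).
import Mathlib
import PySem

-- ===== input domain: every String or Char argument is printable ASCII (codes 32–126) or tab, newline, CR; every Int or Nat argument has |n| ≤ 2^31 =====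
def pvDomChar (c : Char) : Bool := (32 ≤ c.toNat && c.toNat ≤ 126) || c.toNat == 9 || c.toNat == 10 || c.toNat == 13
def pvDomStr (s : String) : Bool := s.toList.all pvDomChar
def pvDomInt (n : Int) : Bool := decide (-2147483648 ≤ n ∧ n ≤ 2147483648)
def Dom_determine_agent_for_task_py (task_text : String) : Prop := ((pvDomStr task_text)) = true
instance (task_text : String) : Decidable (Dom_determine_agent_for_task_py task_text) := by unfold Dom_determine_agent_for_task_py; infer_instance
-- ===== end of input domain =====

set_option maxRecDepth 4000
set_option maxHeartbeats 1000000


-- B replaces A's keyword-major if/any substring branches by a position-major single scan of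
-- the lowercased text with a min-priority accumulator (objective: alternative algorithm).

-- ===== PORT A =====
def determine_agent_for_task_py (task_text : String) : String :=
  let task_lower := PySem.Str.lower task_text
  if ["test", "qa", "verify", "bug", "fix bug", "regression", "validation"].any
      (fun kw => PySem.Str.isIn kw task_lower) then "qa_tester"
  else if ["ui", "ux", "design", "css", "style", "layout", "interface", "frontend", "html", "template"].any
      (fun kw => PySem.Str.isIn kw task_lower) then "ui_ux_engineer"
  else if ["database", "db", "schema", "sql", "migration", "model", "table", "query"].any
      (fun kw => PySem.Str.isIn kw task_lower) then "database_admin"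
  else if ["security", "auth", "authentication", "authorization", "encrypt", "password", "token"].any
      (fun kw => PySem.Str.isIn kw task_lower) then "security_reviewer"
  else "software_engineer"

-- ===== PORT B =====
def pvAgents : List String :=
  ["qa_tester", "ui_ux_engineer", "database_admin", "security_reviewer", "software_engineer"]

def pvKeywords : List (String × Nat) :=
  [ ("test", 0), ("qa", 0), ("verify", 0), ("bug", 0), ("fix bug", 0),
    ("regression", 0), ("validation", 0),
    ("ui", 1), ("ux", 1), ("design", 1), ("css", 1), ("style", 1),
    ("layout", 1), ("interface", 1), ("frontend", 1), ("html", 1),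
    ("template", 1),
    ("database", 2), ("db", 2), ("schema", 2), ("sql", 2), ("migration", 2),
    ("model", 2), ("table", 2), ("query", 2),
    ("security", 3), ("auth", 3), ("authentication", 3),
    ("authorization", 3), ("encrypt", 3), ("password", 3), ("token", 3) ]

-- t.startswith(kw, i) with 0 ≤ i ≤ len(t) is exactly a prefix test on t.toList.drop i.toNat;
-- _AGENTS[best] with best always in range is ported as getD.
def determine_agent_for_task_py_alt (task_text : String) : String :=
  let t := PySem.Str.lower task_text
  let best := (PySem.List.pyRange 0 (PySem.Str.len t + 1) 1).foldl
    (fun b i => pvKeywords.foldl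
      (fun b p =>
        if p.2 < b ∧ PySem.Chars.startswith (t.toList.drop i.toNat) p.1.toList then p.2 else b)
      b) 4
  pvAgents.getD best ""

-- ===== PRECONDITION & SPEC =====
def Spec_determine_agent_for_task_py (task_text : String) (out : String) : Prop := out = determine_agent_for_task_py_alt task_text
instance (task_text : String) (out : String) : Decidable (Spec_determine_agent_for_task_py task_text out) := by unfold Spec_determine_agent_for_task_py; infer_instance

-- ===== CLAIM (what is proved, stated in full; the proofs are below) =====
def Claim_equal_determine_agent_for_task_py : Prop := ∀ (task_text : String), Dom_determine_agent_for_task_py task_text → Spec_determine_agent_for_task_py task_text (determine_agent_for_task_py task_text)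

-- ===== LEMMAS AND PROOFS =====

-- A's four category keyword lists, indexed by priority.
def pvCat : Nat → List String
  | 0 => ["test", "qa", "verify", "bug", "fix bug", "regression", "validation"]
  | 1 => ["ui", "ux", "design", "css", "style", "layout", "interface", "frontend", "html", "template"]
  | 2 => ["database", "db", "schema", "sql", "migration", "model", "table", "query"]
  | 3 => ["security", "auth", "authentication", "authorization", "encrypt", "password", "token"]
  | _ => []

def pvStep (tl : List Char) (k : Nat) (b : Nat) (p : String × Nat) : Nat :=
  if p.2 < b ∧ PySem.Chars.startswith (tl.drop k) p.1.toList then p.2 else b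

def pvInner (tl : List Char) (k b : Nat) : Nat := pvKeywords.foldl (pvStep tl k) b

def pvScan (tl : List Char) (l : List Nat) (b : Nat) : Nat :=
  l.foldl (fun b k => pvInner tl k b) b

-- generic facts about the inner fold
lemma pvFold_le (tl : List Char) (k : Nat) (l : List (String × Nat)) :
    ∀ b, l.foldl (pvStep tl k) b ≤ b := by
  induction l with
  | nil => intro b; simp
  | cons p rest ih =>
      intro b
      simp only [List.foldl_cons]
      refine le_trans (ih _) ?_
      unfold pvStep; split_ifs with h
      · omega
      · exact le_rfl

lemma pvFold_le_of (tl : List Char) (k : Nat) (l : List (String × Nat)) :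
    ∀ b, ∀ p ∈ l, PySem.Chars.startswith (tl.drop k) p.1.toList = true →
      l.foldl (pvStep tl k) b ≤ p.2 := by
  induction l with
  | nil => intro b p hp; simp at hp
  | cons q rest ih =>
      intro b p hp hm
      simp only [List.foldl_cons]
      rcases List.mem_cons.mp hp with h | h
      · subst h
        refine le_trans (pvFold_le tl k rest _) ?_
        unfold pvStep
        rw [hm]
        split_ifs with h'
        · exact le_rfl
        · simp only [and_true, not_lt] at h'
          omega
      · exact ih _ p h hm

lemma pvFold_cases (tl : List Char) (k : Nat) (l : List (String × Nat)) :
    ∀ b, l.foldl (pvStep tl k) b = b ∨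
      ∃ p ∈ l, PySem.Chars.startswith (tl.drop k) p.1.toList = true ∧
        l.foldl (pvStep tl k) b = p.2 := by
  induction l with
  | nil => intro b; left; rfl
  | cons q rest ih =>
      intro b
      simp only [List.foldl_cons]
      rcases ih (pvStep tl k b q) with h | ⟨p, hp, hm, hv⟩
      · rw [h]
        unfold pvStep; split_ifs with h'
        · exact Or.inr ⟨q, List.mem_cons_self .., h'.2, rfl⟩
        · exact Or.inl rfl
      · exact Or.inr ⟨p, List.mem_cons_of_mem _ hp, hm, hv⟩

lemma pvScan_le (tl : List Char) (l : List Nat) : ∀ b, pvScan tl l b ≤ b := by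
  induction l with
  | nil => intro b; simp [pvScan]
  | cons k rest ih =>
      intro b
      simp only [pvScan, List.foldl_cons] at *
      exact le_trans (ih _) (pvFold_le tl k pvKeywords b)

lemma pvScan_le_of (tl : List Char) (l : List Nat) :
    ∀ b, ∀ k ∈ l, ∀ p ∈ pvKeywords,
      PySem.Chars.startswith (tl.drop k) p.1.toList = true → pvScan tl l b ≤ p.2 := by
  induction l with
  | nil => intro b k hk; simp at hk
  | cons j rest ih =>
      intro b k hk p hp hm
      simp only [pvScan, List.foldl_cons]
      rcases List.mem_cons.mp hk with h | h
      · subst h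
        exact le_trans (pvScan_le tl rest _) (pvFold_le_of tl k pvKeywords b p hp hm)
      · show pvScan tl rest (pvInner tl j b) ≤ p.2
        exact ih _ k h p hp hm

lemma pvScan_cases (tl : List Char) (l : List Nat) :
    ∀ b, pvScan tl l b = b ∨
      ∃ k ∈ l, ∃ p ∈ pvKeywords,
        PySem.Chars.startswith (tl.drop k) p.1.toList = true ∧ pvScan tl l b = p.2 := by
  induction l with
  | nil => intro b; left; rfl
  | cons j rest ih =>
      intro b
      simp only [pvScan, List.foldl_cons] at *
      rcases ih (pvInner tl j b) with h | ⟨k, hk, p, hp, hm, hv⟩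
      · rw [h]
        rcases pvFold_cases tl j pvKeywords b with h' | ⟨p, hp, hm, hv⟩
        · exact Or.inl h'
        · exact Or.inr ⟨j, List.mem_cons_self .., p, hp, hm, hv⟩
      · exact Or.inr ⟨k, List.mem_cons_of_mem _ hk, p, hp, hm, hv⟩

-- table facts (closed, decidable)
lemma pvKeywords_sound : ∀ p ∈ pvKeywords, p.1 ∈ pvCat p.2 ∧ p.2 < 4 ∧ p.1.toList ≠ [] := by decide

lemma pvKeywords_complete : ∀ c ∈ [0, 1, 2, 3], ∀ kw ∈ pvCat c, (kw, c) ∈ pvKeywords := by decide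

-- a keyword is a substring of tl iff it matches at some scanned position
lemma pvMatch_iff (tl : List Char) (kw : List Char) (hkw : kw ≠ []) :
    (∃ k ∈ List.range (tl.length + 1), PySem.Chars.startswith (tl.drop k) kw = true) ↔
      PySem.Chars.isIn kw tl = true := by
  constructor
  · rintro ⟨k, _, hm⟩
    exact (PySem.Chars.exists_prefix_drop_iff_isIn _ _).mp
      ⟨k, (PySem.Chars.startswith_iff _ _).mp hm⟩
  · intro h
    rcases (PySem.Chars.exists_prefix_drop_iff_isIn _ _).mpr h with ⟨j, hj⟩
    refine ⟨j, ?_, (PySem.Chars.startswith_iff _ _).mpr hj⟩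
    rw [List.mem_range]
    by_contra hb
    have : tl.drop j = [] := List.drop_eq_nil_of_le (by omega)
    rw [this] at hj
    exact hkw (List.prefix_nil.mp hj)

-- the scan result: bounded by any matching category, and itself a matching category (or 4)
def pvMcat (tl : List Char) (c : Nat) : Prop :=
  ∃ kw ∈ pvCat c, PySem.Chars.isIn kw.toList tl = true

lemma pvScan_le_cat (tl : List Char) (c : Nat) (hc : c ∈ [0, 1, 2, 3])
    (h : pvMcat tl c) : pvScan tl (List.range (tl.length + 1)) 4 ≤ c := by
  rcases h with ⟨kw, hkw, hin⟩
  have hne : kw.toList ≠ [] := by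
    have := pvKeywords_sound (kw, c) (pvKeywords_complete c hc kw hkw)
    exact this.2.2
  rcases (pvMatch_iff tl kw.toList hne).mpr hin with ⟨k, hk, hm⟩
  exact pvScan_le_of tl _ 4 k hk (kw, c) (pvKeywords_complete c hc kw hkw) hm

lemma pvScan_result (tl : List Char) :
    pvScan tl (List.range (tl.length + 1)) 4 = 4 ∨
      (pvScan tl (List.range (tl.length + 1)) 4 < 4 ∧
        pvMcat tl (pvScan tl (List.range (tl.length + 1)) 4)) := by
  rcases pvScan_cases tl (List.range (tl.length + 1)) 4 with h | ⟨k, hk, p, hp, hm, hv⟩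
  · exact Or.inl h
  · right
    have hs := pvKeywords_sound p hp
    refine ⟨by omega, ?_⟩
    rw [hv]
    exact ⟨p.1, hs.1, (pvMatch_iff tl p.1.toList hs.2.2).mp ⟨k, hk, hm⟩⟩

-- B's port reduces to pvScan
lemma alt_eq_scan (task_text : String) :
    determine_agent_for_task_py_alt task_text =
      pvAgents.getD
        (pvScan (PySem.Str.lower task_text).toList
          (List.range ((PySem.Str.lower task_text).toList.length + 1)) 4) "" := by
  unfold determine_agent_for_task_py_alt pvScan pvInner pvStep
  dsimp only
  congr 1
  rw [show (PySem.Str.len (PySem.Str.lower task_text) + 1 : Int)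
        = (((PySem.Str.lower task_text).toList.length + 1 : Nat) : Int) by
      simp [PySem.Str.len]]
  rw [PySem.List.pyRange_zero_natCast]
  rw [List.foldl_map]
  simp only [Int.toNat_natCast]
  rfl

-- A's conditions as pvMcat
lemma pvAny_iff (tl : List Char) (c : Nat) :
    ((pvCat c).any (fun kw => PySem.Chars.isIn kw.toList tl) = true) ↔ pvMcat tl c := by
  simp [pvMcat, List.any_eq_true]

-- ===== VERDICT (by name: the statement is the Claim_ definition above) =====
theorem determine_agent_for_task_py_spec : Claim_equal_determine_agent_for_task_py := by
  intro task_text _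
  unfold Spec_determine_agent_for_task_py
  rw [alt_eq_scan]
  set tl := (PySem.Str.lower task_text).toList with htl
  set r := pvScan tl (List.range (tl.length + 1)) 4 with hr
  unfold determine_agent_for_task_py
  simp only [PySem.Str.isIn_eq, ← htl]
  have h0 : (["test", "qa", "verify", "bug", "fix bug", "regression", "validation"].any
      (fun kw => PySem.Chars.isIn kw.toList tl)) = true ↔ pvMcat tl 0 := pvAny_iff tl 0
  have h1 : (["ui", "ux", "design", "css", "style", "layout", "interface", "frontend", "html", "template"].any
      (fun kw => PySem.Chars.isIn kw.toList tl)) = true ↔ pvMcat tl 1 := pvAny_iff tl 1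
  have h2 : (["database", "db", "schema", "sql", "migration", "model", "table", "query"].any
      (fun kw => PySem.Chars.isIn kw.toList tl)) = true ↔ pvMcat tl 2 := pvAny_iff tl 2
  have h3 : (["security", "auth", "authentication", "authorization", "encrypt", "password", "token"].any
      (fun kw => PySem.Chars.isIn kw.toList tl)) = true ↔ pvMcat tl 3 := pvAny_iff tl 3
  have hres := pvScan_result tl
  rw [← hr] at hres
  split_ifs with c0 c1 c2 c3
  · -- qa
    have hle := pvScan_le_cat tl 0 (by decide) (h0.mp c0)
    rw [← hr] at hle
    have : r = 0 := by omega
    rw [this]; rfl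
  · have hle := pvScan_le_cat tl 1 (by decide) (h1.mp c1)
    rw [← hr] at hle
    have hr1 : r = 1 := by
      rcases hres with h | ⟨_, hm⟩
      · omega
      · interval_cases r
        · exact absurd (h0.mpr hm) c0
        · rfl
    rw [hr1]; rfl
  · have hle := pvScan_le_cat tl 2 (by decide) (h2.mp c2)
    rw [← hr] at hle
    have hr2 : r = 2 := by
      rcases hres with h | ⟨_, hm⟩
      · omega
      · interval_cases r
        · exact absurd (h0.mpr hm) c0
        · exact absurd (h1.mpr hm) c1
        · rfl
    rw [hr2]; rfl
  · have hle := pvScan_le_cat tl 3 (by decide) (h3.mp c3)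
    rw [← hr] at hle
    have hr3 : r = 3 := by
      rcases hres with h | ⟨_, hm⟩
      · omega
      · interval_cases r
        · exact absurd (h0.mpr hm) c0
        · exact absurd (h1.mpr hm) c1
        · exact absurd (h2.mpr hm) c2
        · rfl
    rw [hr3]; rfl
  · have hr4 : r = 4 := by
      rcases hres with h | ⟨hlt, hm⟩
      · exact h
      · interval_cases r
        · exact absurd (h0.mpr hm) c0
        · exact absurd (h1.mpr hm) c1
        · exact absurd (h2.mpr hm) c2
        · exact absurd (h3.mpr hm) c3
    rw [hr4]; rfl
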